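-- pv_equiv track=rewrite | github.com/edanon88/censor | censor.py | email_as_list
-- ===== SOURCE A (Python) =====
-- alphabet=["a", "b", "c", "d", "e", "f", "g", "h", "i", "j", "k", "l", "m", "n", "o", "p", "q", "r", "s", "t", "u", "v", "w", "x", "y", "z", "'", "#"]
--
-- def email_as_list(email):
-- 	email_as_list = []
-- 	i=0
-- 	while i < len(email):
-- 		if email[i].lower() in alphabet:
-- 			word = ""
-- 			while email[i].lower() in alphabet:
-- 				word = word + email[i]
-- 				i += 1
-- 				if i == len (email):
-- 					email_as_list.append(word)
-- 					return email_as_list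
-- 			email_as_list.append(word)
-- 			email_as_list.append(email[i])
-- 			i += 1
-- 		else:
-- 			email_as_list.append(email[i])
-- 			i += 1
-- 	return email_as_list
-- ===== SOURCE B (Python) =====
-- WORD_CHARS = "abcdefghijklmnopqrstuvwxyz'#"
--
-- def email_as_list(email):
--     tokens = []
--     word = ""
--     for ch in email:
--         if ch.lower() in WORD_CHARS:
--             word += ch
--         else:
--             if word:
--                 tokens.append(word)
--                 word = ""
--             tokens.append(ch)
--     if word:
--         tokens.append(word)
--     return tokens
-- ===== Notes on version B (the rewrite author's own statement) =====
-- stated objective: simpler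
-- what changed: Replaced the nested index-based while loops (inner loop with an early return and manual i bookkeeping) with a single for-each pass that carries a pending-word accumulator and flushes it at separators and at the end.
import Mathlib
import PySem

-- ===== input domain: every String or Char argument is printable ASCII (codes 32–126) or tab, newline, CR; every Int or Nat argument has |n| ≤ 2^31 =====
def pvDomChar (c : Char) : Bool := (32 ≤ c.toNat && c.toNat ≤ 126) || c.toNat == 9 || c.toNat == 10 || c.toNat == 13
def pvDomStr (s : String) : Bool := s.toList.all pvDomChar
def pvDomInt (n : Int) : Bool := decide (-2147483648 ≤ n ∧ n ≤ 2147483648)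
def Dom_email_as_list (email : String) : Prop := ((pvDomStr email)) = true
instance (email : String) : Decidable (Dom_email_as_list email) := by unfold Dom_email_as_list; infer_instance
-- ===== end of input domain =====

-- B replaces A's nested index-based while loops with one for-each pass carrying a pending-word
-- accumulator (objective: simpler).

-- ===== PORT A =====
-- A's module-level `alphabet` list of one-character strings
def pvAlphabet : List String :=
  ["a", "b", "c", "d", "e", "f", "g", "h", "i", "j", "k", "l", "m", "n",
   "o", "p", "q", "r", "s", "t", "u", "v", "w", "x", "y", "z", "'", "#"]

-- the inner `while email[i].lower() in alphabet` loop: returns the built word and the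
-- remaining characters (empty remainder = the early `return` when i == len(email))
def pvInnerA : List Char → String → String × List Char
  | [], word => (word, [])
  | c :: rest, word =>
    if pvAlphabet.contains (PySem.Str.lower (String.ofList [c])) then
      pvInnerA rest (word.push c)
    else (word, c :: rest)

theorem pvInnerA_len_le : ∀ (cs : List Char) (w : String), (pvInnerA cs w).2.length ≤ cs.length := by
  intro cs
  induction cs with
  | nil => intro w; simp [pvInnerA]
  | cons c rest ih =>
    intro w
    simp only [pvInnerA]
    split
    · exact le_trans (ih _) (Nat.le_succ _)
    · simp

-- the outer `while i < len(email)` loop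
def pvOuterA : List Char → List String
  | [] => []
  | c :: rest =>
    if pvAlphabet.contains (PySem.Str.lower (String.ofList [c])) then
      match h : pvInnerA (c :: rest) "" with
      | (word, []) => [word]
      | (word, _sep :: rest') => word :: String.ofList [_sep] :: pvOuterA rest'
    else String.ofList [c] :: pvOuterA rest
  termination_by cs => cs.length
  decreasing_by
    · have h2 : (pvInnerA (c :: rest) "").2 = _sep :: rest' := by rw [h]
      have hle := pvInnerA_len_le (c :: rest) ""
      rw [h2] at hle
      simp only [List.length_cons] at hle ⊢
      omega
    · simp only [List.length_cons]
      omega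

def email_as_list (email : String) : List String := pvOuterA email.toList

-- ===== PORT B =====
-- B's module-level WORD_CHARS string; `ch.lower() in WORD_CHARS` is single-character
-- substring membership, i.e. membership of the lowered character in WORD_CHARS' characters
def pvWordChars : List Char := "abcdefghijklmnopqrstuvwxyz'#".toList

-- the body of B's `for ch in email` loop: state = (tokens, word)
def pvStepB (st : List String × String) (ch : Char) : List String × String :=
  if pvWordChars.contains (PySem.Chars.lowerChar ch) then (st.1, st.2.push ch)
  else if st.2 = "" then (st.1 ++ [String.ofList [ch]], "")
  else (st.1 ++ [st.2, String.ofList [ch]], "")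

def email_as_list_alt (email : String) : List String :=
  let st := email.toList.foldl pvStepB ([], "")
  if st.2 = "" then st.1 else st.1 ++ [st.2]

-- ===== PRECONDITION & SPEC =====
def Spec_email_as_list (email : String) (out : List String) : Prop := out = email_as_list_alt email
instance (email : String) (out : List String) : Decidable (Spec_email_as_list email out) := by unfold Spec_email_as_list; infer_instance

-- ===== CLAIM (what is proved, stated in full; the proofs are below) =====
def Claim_equal_email_as_list : Prop := ∀ (email : String), Dom_email_as_list email → Spec_email_as_list email (email_as_list email)

-- ===== LEMMAS AND PROOFS =====

def pvIsW (c : Char) : Bool := pvWordChars.contains (PySem.Chars.lowerChar c)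

theorem pv_singleton_beq (d x : Char) : (String.ofList [d] == String.ofList [x]) = (d == x) := by
  rcases h : d == x with _ | _
  · simp only [beq_eq_false_iff_ne] at h
    simp only [beq_eq_false_iff_ne, ne_eq]
    intro hc
    apply h
    have := congrArg String.toList hc
    simpa using this
  · simp only [beq_iff_eq] at h
    subst h
    simp

theorem pv_contains_map (l : List Char) (d : Char) :
    (l.map (fun c => String.ofList [c])).contains (String.ofList [d]) = l.contains d := by
  induction l with
  | nil => simp
  | cons x xs ih =>
    simp only [List.map_cons, List.contains_cons, pv_singleton_beq, ih]

theorem pvAlphabet_eq : pvAlphabet = pvWordChars.map (fun c => String.ofList [c]) := by decide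

-- A's word-character test equals B's
theorem pv_isW_eq (c : Char) :
    pvAlphabet.contains (PySem.Str.lower (String.ofList [c])) = pvIsW c := by
  have h : PySem.Str.lower (String.ofList [c]) = String.ofList [PySem.Chars.lowerChar c] :=
    String.toList_inj.mp (by simp [PySem.Chars.lower])
  rw [pvAlphabet_eq, h, pv_contains_map]
  rfl

def pvFlushB (st : List String × String) : List String :=
  if st.2 = "" then st.1 else st.1 ++ [st.2]

theorem pvInnerA_spec : ∀ (cs : List Char) (w : String),
    pvInnerA cs w = (String.ofList (w.toList ++ cs.takeWhile pvIsW), cs.dropWhile pvIsW) := by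
  intro cs
  induction cs with
  | nil => intro w; simp [pvInnerA]
  | cons c rest ih =>
    intro w
    simp only [pvInnerA, pv_isW_eq]
    by_cases hc : pvIsW c = true
    · simp [hc, ih, List.takeWhile_cons, List.dropWhile_cons]
    · simp [hc, List.takeWhile_cons, List.dropWhile_cons]

theorem pvFoldB_run : ∀ (run : List Char) (t : List String) (w : String),
    (∀ x ∈ run, pvIsW x = true) →
    List.foldl pvStepB (t, w) run = (t, String.ofList (w.toList ++ run)) := by
  intro run
  induction run with
  | nil => intro t w _; simp
  | cons x xs ih =>
    intro t w hall
    have hx : pvIsW x = true := hall x (by simp)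
    simp only [List.foldl_cons, pvStepB]
    rw [if_pos (show pvWordChars.contains (PySem.Chars.lowerChar x) = true from hx)]
    rw [ih t (w.push x) (fun y hy => hall y (by simp [hy]))]
    simp

theorem pvFoldB_tokens : ∀ (cs : List Char) (t : List String) (w : String),
    List.foldl pvStepB (t, w) cs
      = (t ++ (List.foldl pvStepB ([], w) cs).1, (List.foldl pvStepB ([], w) cs).2) := by
  intro cs
  induction cs with
  | nil => intro t w; simp
  | cons c rest ih =>
    intro t w
    simp only [List.foldl_cons, pvStepB]
    by_cases h1 : pvWordChars.contains (PySem.Chars.lowerChar c) = true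
    · rw [if_pos h1, if_pos h1]
      exact ih t (w.push c)
    · rw [if_neg h1, if_neg h1]
      by_cases h2 : w = ""
      · rw [if_pos h2, if_pos h2, List.nil_append]
        rw [ih (t ++ [String.ofList [c]]) "", ih [String.ofList [c]] ""]
        simp
      · rw [if_neg h2, if_neg h2, List.nil_append]
        rw [ih (t ++ [w, String.ofList [c]]) "", ih [w, String.ofList [c]] ""]
        simp

theorem pvFlushB_append (t : List String) (st : List String × String) :
    pvFlushB (t ++ st.1, st.2) = t ++ pvFlushB st := by
  unfold pvFlushB
  split <;> simp

theorem pv_dropWhile_head_false {p : Char → Bool} :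
    ∀ (l : List Char) (a : Char) (as : List Char), l.dropWhile p = a :: as → p a = false := by
  intro l
  induction l with
  | nil => intro a as h; simp at h
  | cons b bs ih =>
    intro a as h
    by_cases hb : p b = true
    · rw [List.dropWhile_cons, if_pos hb] at h
      exact ih a as h
    · rw [List.dropWhile_cons, if_neg hb] at h
      cases h
      simpa using hb

theorem pv_ofList_cons_ne_empty (c : Char) (l : List Char) : String.ofList (c :: l) ≠ "" := by
  intro h
  have := congrArg String.toList h
  simp at this

theorem pvMain : ∀ cs : List Char, pvOuterA cs = pvFlushB (List.foldl pvStepB ([], "") cs) := by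
  intro cs
  induction cs using pvOuterA.induct with
  | case1 => simp [pvOuterA, pvFlushB]
  | case2 c rest hcond word h =>
    -- word-char head, inner loop consumed everything (A's early return)
    rw [pv_isW_eq] at hcond
    rw [pvInnerA_spec] at h
    have hdrop : (c :: rest).dropWhile pvIsW = [] := congrArg Prod.snd h
    have htake : (c :: rest).takeWhile pvIsW = c :: rest := by
      have := List.takeWhile_append_dropWhile (p := pvIsW) (l := c :: rest)
      rw [hdrop] at this
      simpa using this
    have hword : word = String.ofList (c :: rest) := by
      have := congrArg Prod.fst h
      simp only at this
      rw [← this, htake]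
      simp
    have hall : ∀ x ∈ c :: rest, pvIsW x = true := by
      intro x hx
      exact List.mem_takeWhile_imp (by rw [htake]; exact hx)
    rw [pvOuterA]
    rw [if_pos (by rw [pv_isW_eq]; exact hcond)]
    rw [pvInnerA_spec, htake, hdrop]
    rw [pvFoldB_run (c :: rest) [] "" hall]
    simp [pvFlushB, pv_ofList_cons_ne_empty]
  | case3 c rest hcond word sep rest' h ih =>
    -- word-char head, inner loop stopped at a separator
    rw [pv_isW_eq] at hcond
    have hspec := h
    rw [pvInnerA_spec] at hspec
    have hdrop : (c :: rest).dropWhile pvIsW = sep :: rest' := congrArg Prod.snd hspec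
    have hword : word = String.ofList ((c :: rest).takeWhile pvIsW) := by
      have := congrArg Prod.fst hspec
      simp only at this
      rw [← this]
      simp
    have htake : (c :: rest).takeWhile pvIsW = c :: rest.takeWhile pvIsW := by
      rw [List.takeWhile_cons, if_pos hcond]
    have hsplit : c :: rest = (c :: rest).takeWhile pvIsW ++ (sep :: rest') := by
      rw [← hdrop]
      exact (List.takeWhile_append_dropWhile).symm
    have hsep : pvIsW sep = false := pv_dropWhile_head_false (c :: rest) sep rest' hdrop
    have hall : ∀ x ∈ (c :: rest).takeWhile pvIsW, pvIsW x = true := by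
      intro x hx
      exact List.mem_takeWhile_imp hx
    rw [pvOuterA, if_pos (by rw [pv_isW_eq]; exact hcond)]
    split
    · rename_i word2 hreq
      rw [h] at hreq
      simp at hreq
    · rename_i word2 sep2 rest2 hreq
      rw [h] at hreq
      injection hreq with hw hr
      injection hr with hs hr
      subst hw; subst hs; subst hr
      -- B side
      conv_rhs => rw [hsplit]
      rw [List.foldl_append, pvFoldB_run _ [] "" hall, List.foldl_cons]
      have hwne : String.ofList ((c :: rest).takeWhile pvIsW) ≠ "" := by
        rw [htake]
        exact pv_ofList_cons_ne_empty _ _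
      have hstep : pvStepB ([], String.ofList ((c :: rest).takeWhile pvIsW)) sep
          = ([String.ofList ((c :: rest).takeWhile pvIsW), String.ofList [sep]], "") := by
        unfold pvStepB
        rw [if_neg (by simpa [pvIsW] using hsep)]
        simp [hwne]
      rw [show String.ofList ("".toList ++ (c :: rest).takeWhile pvIsW)
            = String.ofList ((c :: rest).takeWhile pvIsW) by simp]
      rw [hstep]
      rw [pvFoldB_tokens rest' [String.ofList ((c :: rest).takeWhile pvIsW), String.ofList [sep]] ""]
      rw [pvFlushB_append, ← ih, hword]
      simp
  | case4 c rest hcond ih =>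
    -- separator head
    rw [pv_isW_eq] at hcond
    rw [pvOuterA]
    rw [if_neg (by rw [pv_isW_eq]; exact hcond)]
    rw [List.foldl_cons]
    have hstep : pvStepB ([], "") c = ([String.ofList [c]], "") := by
      unfold pvStepB
      rw [if_neg (by simpa [pvIsW] using hcond)]
      simp
    rw [hstep]
    rw [pvFoldB_tokens rest [String.ofList [c]] ""]
    rw [pvFlushB_append, ← ih]
    simp

-- ===== VERDICT (by name: the statement is the Claim_ definition above) =====
theorem email_as_list_spec : Claim_equal_email_as_list := by
  intro email _
  unfold Spec_email_as_list email_as_list email_as_list_alt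
  simpa [pvFlushB] using pvMain email.toList
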